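-- pv_equiv track=rewrite | github.com/jsw4215/algorithm_study | hashTable/topKFrequentElements.py | solution
-- ===== SOURCE A (Python) =====
-- def solution(elements, k):
--
--     hash = {}
--     result = []
--
--     for e in elements:
--         if e in hash:
--             hash[e]+=1
--         else:
--             hash[e]=1
--
--     for i in hash:
--         if hash[i]>=k:
--             result.append(i)
--
--     return result
-- ===== SOURCE B (Python) =====
-- def solution(elements, k):
--     seen = set()
--     result = []
--     for e in elements:
--         if e not in seen:
--             seen.add(e)
--             if elements.count(e) >= k:
--                 result.append(e)
--     return result
-- ===== Notes on version B (the rewrite author's own statement) =====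
-- stated objective: alternative
-- what changed: Replaces the prebuilt frequency dictionary and second pass over its keys with a single pass keeping a 'seen' set and computing each new element's frequency on demand with elements.count(e).
import Mathlib
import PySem

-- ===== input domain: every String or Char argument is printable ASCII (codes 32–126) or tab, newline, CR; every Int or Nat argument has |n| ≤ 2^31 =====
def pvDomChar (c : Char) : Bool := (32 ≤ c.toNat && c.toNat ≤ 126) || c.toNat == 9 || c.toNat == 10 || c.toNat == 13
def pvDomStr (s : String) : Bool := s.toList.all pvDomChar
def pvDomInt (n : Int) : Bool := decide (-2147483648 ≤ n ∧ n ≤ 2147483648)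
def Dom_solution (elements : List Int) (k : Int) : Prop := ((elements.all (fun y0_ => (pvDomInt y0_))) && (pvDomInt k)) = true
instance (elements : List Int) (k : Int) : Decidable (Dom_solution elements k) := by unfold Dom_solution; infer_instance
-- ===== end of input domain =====

-- B replaces A's prebuilt frequency dictionary + key pass with one pass over the
-- elements keeping a 'seen' set and counting each fresh element on demand (alternative, not faster).


-- ===== PORT A =====
-- first loop: build the count dict; second loop: append keys with count >= k
def solution (elements : List Int) (k : Int) : List Int :=
  let hash : PySem.Dict Int Int :=
    elements.foldl (fun d e =>
      if d.contains e then d.insert e (d.getD e 0 + 1) else d.insert e 1) PySem.Dict.empty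
  hash.keys.foldl (fun result i =>
    if hash.getD i 0 ≥ k then result ++ [i] else result) []

-- ===== PORT B =====
-- one pass: seen set + on-demand elements.count
def solution_alt (elements : List Int) (k : Int) : List Int :=
  (elements.foldl (fun (st : PySem.Set Int × List Int) e =>
      if PySem.Set.contains st.1 e then st
      else (PySem.Set.add st.1 e,
            if (elements.count e : Int) ≥ k then st.2 ++ [e] else st.2))
    (PySem.Set.empty, [])).2

-- ===== PRECONDITION & SPEC =====
def Spec_solution (elements : List Int) (k : Int) (out : List Int) : Prop := out = solution_alt elements k
instance (elements : List Int) (k : Int) (out : List Int) : Decidable (Spec_solution elements k out) := by unfold Spec_solution; infer_instance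

-- ===== CLAIM (what is proved, stated in full; the proofs are below) =====
def Claim_equal_solution : Prop := ∀ (elements : List Int) (k : Int), Dom_solution elements k → Spec_solution elements k (solution elements k)

-- ===== LEMMAS AND PROOFS =====

-- A's first loop builds exactly collections.Counter(elements)
theorem solutionA_dict (elements : List Int) :
    elements.foldl (fun d e =>
      if d.contains e then d.insert e (d.getD e 0 + 1) else d.insert e 1) PySem.Dict.empty
      = PySem.Dict.counter elements := by
  rw [← PySem.Dict.foldl_insert_getD_add_one_eq_counter]
  apply PySem.List.foldl_congr_mem
  intro d e _
  by_cases h : d.contains e = true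
  · simp [h]
  · have h0 : d.getD e 0 = 0 := PySem.Dict.getD_of_not_contains _ _ (by simpa using h)
    simp [h, h0]

-- B's loop, seeded with the already-seen set s, appends the fresh elements that pass p
theorem solutionB_loop (p : Int → Prop) [DecidablePred p] (l : List Int) :
    l.foldl (fun (st : PySem.Set Int × List Int) e =>
        if PySem.Set.contains st.1 e then st
        else (PySem.Set.add st.1 e, if p e then st.2 ++ [e] else st.2))
      (PySem.Set.empty, [])
      = (PySem.Set.ofList l, (PySem.Set.ofList l).filter (fun e => decide (p e))) := by
  induction l using List.reverseRecOn with
  | nil => rfl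
  | append_singleton t e ih =>
      rw [List.foldl_append, ih, PySem.Set.ofList_append_singleton]
      by_cases h : e ∈ t
      · have hm : e ∈ PySem.Set.ofList t := by simpa using h
        rw [PySem.Set.add_of_mem hm]
        simp [h]
      · have hm : e ∉ PySem.Set.ofList t := by simpa using h
        rw [PySem.Set.add_of_not_mem hm, List.filter_append]
        by_cases hp : p e <;> simp [h, hp]

-- ===== VERDICT (by name: the statement is the Claim_ definition above) =====
theorem solution_spec : Claim_equal_solution := by
  intro elements k _
  show solution elements k = solution_alt elements k
  unfold solution solution_alt
  simp only [solutionA_dict, solutionB_loop (fun e => ((elements.count e : Int) ≥ k)),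
    PySem.Dict.keys_counter, PySem.List.foldl_append_ite_eq_filter, List.nil_append]
  exact List.filter_congr (fun x _ => by simp [PySem.Dict.getD_counter])
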